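-- pv_equiv track=rewrite | github.com/RauPro/Competitive-Programming | USACO GUIDE/SILVER/Binary Seach/C. Cellular Network.py | solve
-- ===== SOURCE A (Python) =====
-- def can(cover, a, b):
--     piv_i = 0
--     i = 0
--     while i < len(a):
--         last = b[piv_i] + cover
--         last_down = b[piv_i] - cover
--         if last_down <= a[i] <= last:
--             i += 1
--             continue
--         elif last < a[i] and piv_i < len(b)-1:
--             piv_i += 1
--             continue
--         else:
--             return False
--     return True
--
-- def solve(n,b ,a ):
--     a.sort()
--     b.sort()
--     lo = 0
--     hi = int(10e9 + 5)
--     #hi = 100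
--     while abs(lo - hi) != 1:
--         mid = (lo + hi) // 2
--         if can(mid, a, b):
--             hi = mid
--         else:
--             lo = mid
--
--     return lo if can(lo, a, b) else hi
-- ===== SOURCE B (Python) =====
-- def solve(n, b, a):
--     # Direct computation: answer = max over cities of distance to nearest tower.
--     # Both lists sorted (in place, like A), then one merged pass with a pointer
--     # that tracks the nearest tower for the current city.
--     a.sort()
--     b.sort()
--     best = 0
--     j = 0
--     for x in a:
--         while j + 1 < len(b) and abs(b[j + 1] - x) <= abs(b[j] - x):
--             j += 1
--         best = max(best, abs(b[j] - x))
--     return best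
-- ===== Notes on version B (the rewrite author's own statement) =====
-- stated objective: faster
-- what changed: A binary-searches the answer, re-running a greedy feasibility scan (can) for each of ~34 candidate radii; B computes the answer directly in one merged pass over the sorted cities, advancing a pointer to each city's nearest tower and taking the maximum distance.
import Mathlib
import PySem

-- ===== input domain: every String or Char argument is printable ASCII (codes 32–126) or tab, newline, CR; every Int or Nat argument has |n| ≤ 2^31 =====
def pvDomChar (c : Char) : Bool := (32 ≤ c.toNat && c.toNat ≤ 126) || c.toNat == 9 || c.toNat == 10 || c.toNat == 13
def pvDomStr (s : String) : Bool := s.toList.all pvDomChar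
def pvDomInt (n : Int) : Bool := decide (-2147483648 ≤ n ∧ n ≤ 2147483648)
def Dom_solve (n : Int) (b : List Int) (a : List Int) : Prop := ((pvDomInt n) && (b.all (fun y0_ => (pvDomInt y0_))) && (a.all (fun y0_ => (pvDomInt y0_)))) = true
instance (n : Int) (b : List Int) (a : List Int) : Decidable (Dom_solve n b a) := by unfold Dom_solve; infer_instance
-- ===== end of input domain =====

-- B replaces A's binary search over the answer (a greedy feasibility scan per candidate
-- radius) by one merged pass over the sorted lists taking the max distance to the nearest
-- tower. Both Pythons sort a and b in place; the equivalence proved is about the return value.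

-- ===== PORT A =====
-- the while-loop of `can`, recursing on (i, piv_i); `b[piv_i]` is ported with pyGetD
-- (in range whenever the loop body runs under Pre_; with b = [] Python raises IndexError)
def canLoop (cover : Int) (a b : List Int) (i piv : Nat) : Bool :=
  if h : i < a.length then
    if PySem.List.pyGetD b (piv : Int) 0 - cover ≤ PySem.List.pyGetD a (i : Int) 0 ∧
       PySem.List.pyGetD a (i : Int) 0 ≤ PySem.List.pyGetD b (piv : Int) 0 + cover then
      canLoop cover a b (i + 1) piv
    else if PySem.List.pyGetD b (piv : Int) 0 + cover < PySem.List.pyGetD a (i : Int) 0 ∧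
            (piv : Int) < (b.length : Int) - 1 then
      canLoop cover a b i (piv + 1)
    else false
  else true
termination_by (a.length - i) + (b.length - piv)
decreasing_by
  · omega
  · omega

def can (cover : Int) (a b : List Int) : Bool := canLoop cover a b 0 0

-- the binary-search while-loop of `solve`; the final `else` branch is a totalizing guard
-- (unreachable from the initial call lo = 0 < hi)
def bsLoop (a b : List Int) (lo hi : Int) : Int :=
  if (lo - hi).natAbs = 1 then (if can lo a b then lo else hi)
  else if h : lo + 1 < hi then
    if can (PySem.Int.floordiv (lo + hi) 2) a b then bsLoop a b lo (PySem.Int.floordiv (lo + hi) 2)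
    else bsLoop a b (PySem.Int.floordiv (lo + hi) 2) hi
  else (if can lo a b then lo else hi)
termination_by (hi - lo).toNat
decreasing_by
  · rw [PySem.Int.floordiv_eq_ediv_of_pos (by norm_num : (0:Int) < 2)]; omega
  · rw [PySem.Int.floordiv_eq_ediv_of_pos (by norm_num : (0:Int) < 2)]; omega

def solve (n : Int) (b : List Int) (a : List Int) : Int :=
  bsLoop (PySem.List.sorted a (fun x => x)) (PySem.List.sorted b (fun x => x)) 0 10000000005

-- ===== PORT B =====
-- the inner while-loop of B: advance j while the next tower is at least as close to x
def nearestFrom (b : List Int) (x : Int) (j : Nat) : Nat :=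
  if h : j + 1 < b.length ∧ |b.getD (j + 1) 0 - x| ≤ |b.getD j 0 - x| then
    nearestFrom b x (j + 1)
  else j
termination_by b.length - j
decreasing_by omega

-- the for-loop of B over the sorted cities, carrying the tower pointer j and `best`
def altLoop (b : List Int) (a : List Int) (j : Nat) (best : Int) : Int :=
  match a with
  | [] => best
  | x :: rest =>
      altLoop b rest (nearestFrom b x j) (max best |b.getD (nearestFrom b x j) 0 - x|)

def solve_alt (n : Int) (b : List Int) (a : List Int) : Int :=
  altLoop (PySem.List.sorted b (fun x => x)) (PySem.List.sorted a (fun x => x)) 0 0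

-- ===== PRECONDITION & SPEC =====
-- Pre_ excludes only b = [] with a ≠ [], where both A and B raise IndexError (b[0] / b[j]).
def Pre_solve (n : Int) (b : List Int) (a : List Int) : Prop := a = [] ∨ b ≠ []
instance (n : Int) (b : List Int) (a : List Int) : Decidable (Pre_solve n b a) := by
  unfold Pre_solve; infer_instance

def pvWitness_solve : Int × List Int × List Int := (3, [1, 5], [2, 6])

def Spec_solve (n : Int) (b : List Int) (a : List Int) (out : Int) : Prop := out = solve_alt n b a
instance (n : Int) (b : List Int) (a : List Int) (out : Int) : Decidable (Spec_solve n b a out) := by unfold Spec_solve; infer_instance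

-- ===== CLAIM (what is proved, stated in full; the proofs are below) =====
def Claim_equal_solve : Prop := ∀ (n : Int) (b : List Int) (a : List Int), Dom_solve n b a → Pre_solve n b a → Spec_solve n b a (solve n b a)


-- ===== LEMMAS AND PROOFS =====

theorem getD_mono {l : List Int} (h : l.Pairwise (· ≤ ·)) {i j : Nat}
    (hij : i ≤ j) (hj : j < l.length) : l.getD i 0 ≤ l.getD j 0 := by
  rcases Nat.lt_or_ge i j with hlt | hge
  · have hi : i < l.length := Nat.lt_trans hlt hj
    have := List.pairwise_iff_getElem.mp h i j hi hj hlt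
    rwa [List.getD_eq_getElem l 0 hi, List.getD_eq_getElem l 0 hj]
  · have : i = j := Nat.le_antisymm hij hge
    subst this; exact le_refl _

theorem abs_persist {u v x x' : Int} (huv : u ≤ v) (h : |v - x| ≤ |u - x|) (hx : x ≤ x') :
    |v - x'| ≤ |u - x'| := by
  simp only [Int.abs_eq_natAbs] at *; omega

-- characterisation of A's greedy feasibility scan
theorem canLoop_iff (cover : Int) (a b : List Int)
    (ha : a.Pairwise (· ≤ ·)) (hb : b.Pairwise (· ≤ ·)) (i piv : Nat) :
    piv < b.length →
    (∀ k, k < piv → ∀ j, i ≤ j → j < a.length → b.getD k 0 + cover < a.getD j 0) →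
    (canLoop cover a b i piv = true ↔
      ∀ j, i ≤ j → j < a.length → ∃ k, k < b.length ∧ |a.getD j 0 - b.getD k 0| ≤ cover) := by
  fun_induction canLoop cover a b i piv with
  | case1 i piv h hcond ih =>
    simp only [PySem.List.pyGetD_natCast] at hcond
    intro hpiv hH
    rw [ih hpiv (fun k hk j hj hjl => hH k hk j (by omega) hjl)]
    constructor
    · intro hQ j hij hjl
      rcases eq_or_lt_of_le hij with rfl | hlt
      · exact ⟨piv, hpiv, by simp only [Int.abs_eq_natAbs]; omega⟩
      · exact hQ j hlt hjl
    · intro hQ j hij hjl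
      exact hQ j (by omega) hjl
  | case2 i piv h hn1 hcond ih =>
    simp only [PySem.List.pyGetD_natCast] at hn1 hcond
    intro hpiv hH
    obtain ⟨hlast, hlen⟩ := hcond
    have hpiv1 : piv + 1 < b.length := by omega
    rw [ih hpiv1 ?_]
    intro k hk j hj hjl
    rcases Nat.lt_or_ge k piv with hkp | hkp
    · exact hH k hkp j hj hjl
    · have hkpe : k = piv := by omega
      subst hkpe
      calc b.getD k 0 + cover < a.getD i 0 := hlast
        _ ≤ a.getD j 0 := getD_mono ha hj hjl
  | case3 i piv h hn1 hn2 =>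
    simp only [PySem.List.pyGetD_natCast] at hn1 hn2
    intro hpiv hH
    constructor
    · intro hfalse; exact absurd hfalse (by simp)
    · intro hQ; exfalso
      obtain ⟨k, hk, habs⟩ := hQ i (le_refl i) h
      simp only [Int.abs_eq_natAbs] at habs
      by_cases hle : a.getD i 0 ≤ b.getD piv 0 + cover
      · have hlow : a.getD i 0 < b.getD piv 0 - cover := by
          rcases not_and_or.mp hn1 with h' | h' <;> omega
        rcases Nat.lt_or_ge k piv with hkp | hkp
        · have := hH k hkp i (le_refl i) h
          omega
        · have := getD_mono hb hkp hk
          omega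
      · have hpl : ¬((piv : Int) < (b.length : Int) - 1) := fun hh => hn2 ⟨by omega, hh⟩
        have hkle : k ≤ piv := by omega
        have := getD_mono hb hkle hpiv
        omega
  | case4 i piv h =>
    intro _ _
    simp only [true_iff]
    intro j hij hjl
    exact absurd hjl (by omega)

theorem can_nil (c : Int) (b : List Int) : can c [] b = true := by
  rw [can, canLoop]
  simp

-- the binary search returns the least nonnegative c with can c a b = true
theorem bsLoop_least (a b : List Int)
    (hmono : ∀ c d : Int, c ≤ d → can c a b = true → can d a b = true)
    (lo hi : Int) :
    0 ≤ lo → lo < hi → can hi a b = true → (can lo a b = false ∨ lo = 0) →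
    0 ≤ bsLoop a b lo hi ∧ can (bsLoop a b lo hi) a b = true ∧
      ∀ c : Int, 0 ≤ c → can c a b = true → bsLoop a b lo hi ≤ c := by
  fun_induction bsLoop a b lo hi with
  | case1 lo hi h1 hcanlo =>
    intro hlo hlt hhi hinv
    have hlo0 : lo = 0 := by
      rcases hinv with h' | h'
      · rw [hcanlo] at h'; cases h'
      · exact h'
    subst hlo0
    exact ⟨le_refl 0, hcanlo, fun c hc _ => hc⟩
  | case2 lo hi h1 hcanlo =>
    intro hlo hlt hhi hinv
    refine ⟨by omega, ?_, ?_⟩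
    · have : hi = lo + 1 := by omega
      subst this; exact hhi
    · intro c hc hcan
      by_contra hgt
      have hcle : c ≤ lo := by omega
      have := hmono c lo hcle hcan
      simp only [Bool.not_eq_true] at hcanlo
      rw [this] at hcanlo
      cases hcanlo
  | case3 lo hi h1 h2 hcanmid ih =>
    intro hlo hlt hhi hinv
    have e : PySem.Int.floordiv (lo + hi) 2 = (lo + hi) / 2 :=
      PySem.Int.floordiv_eq_ediv_of_pos (by norm_num)
    rw [e] at ih hcanmid ⊢
    exact ih hlo (by omega) hcanmid hinv
  | case4 lo hi h1 h2 hcanmid ih =>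
    intro hlo hlt hhi hinv
    have e : PySem.Int.floordiv (lo + hi) 2 = (lo + hi) / 2 :=
      PySem.Int.floordiv_eq_ediv_of_pos (by norm_num)
    simp only [Bool.not_eq_true] at hcanmid
    rw [e] at ih hcanmid ⊢
    exact ih (by omega) (by omega) hhi (Or.inl hcanmid)
  | case5 lo hi h1 h2 hcanlo =>
    intro hlo hlt hhi hinv
    exfalso; omega
  | case6 lo hi h1 h2 hcanlo =>
    intro hlo hlt hhi hinv
    exfalso; omega

theorem chain_desc (b : List Int) (x : Int) (j : Nat)
    (hchain : ∀ k : Nat, k + 1 ≤ j → |b.getD (k+1) 0 - x| ≤ |b.getD k 0 - x|) :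
    ∀ k : Nat, k ≤ j → |b.getD j 0 - x| ≤ |b.getD k 0 - x| := by
  induction j with
  | zero =>
    intro k hk
    have : k = 0 := by omega
    subst this; exact le_refl _
  | succ j ih =>
    intro k hk
    rcases Nat.eq_or_lt_of_le hk with he | hk'
    · subst he; exact le_refl _
    · calc |b.getD (j+1) 0 - x| ≤ |b.getD j 0 - x| := hchain j (le_refl _)
        _ ≤ |b.getD k 0 - x| := ih (fun k' hk' => hchain k' (by omega)) k (by omega)

-- after the inner while-loop, b[j'] is a nearest tower to x
theorem nearestFrom_spec (b : List Int) (hb : b.Pairwise (· ≤ ·)) (x : Int) (j : Nat) :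
    j < b.length →
    (∀ k : Nat, k + 1 ≤ j → |b.getD (k+1) 0 - x| ≤ |b.getD k 0 - x|) →
    j ≤ nearestFrom b x j ∧ nearestFrom b x j < b.length ∧
      (∀ k : Nat, k + 1 ≤ nearestFrom b x j → |b.getD (k+1) 0 - x| ≤ |b.getD k 0 - x|) ∧
      (∀ k : Nat, k < b.length → |b.getD (nearestFrom b x j) 0 - x| ≤ |b.getD k 0 - x|) := by
  fun_induction nearestFrom b x j with
  | case1 j h ih =>
    intro hj hchain
    have hch' : ∀ k : Nat, k + 1 ≤ j + 1 → |b.getD (k+1) 0 - x| ≤ |b.getD k 0 - x| := by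
      intro k hk
      rcases Nat.lt_or_ge (k+1) (j+1) with hkk | hkk
      · exact hchain k (by omega)
      · have : k = j := by omega
        subst this; exact h.2
    obtain ⟨h1, h2, h3, h4⟩ := ih h.1 hch'
    exact ⟨by omega, h2, h3, h4⟩
  | case2 j hneg =>
    intro hj hchain
    refine ⟨le_refl _, hj, hchain, ?_⟩
    intro k hk
    rcases Nat.lt_or_ge j k with hgt | hle2
    · have hjl : j + 1 < b.length := by omega
      rcases not_and_or.mp hneg with hlen | habs
      · exact absurd hjl hlen
      · rw [not_le] at habs
        have hbx : x < b.getD (j+1) 0 := by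
          by_contra hxx
          rw [not_lt] at hxx
          have hmono1 : b.getD j 0 ≤ b.getD (j+1) 0 := getD_mono hb (Nat.le_succ j) hjl
          simp only [Int.abs_eq_natAbs] at habs
          omega
        have hmono2 : b.getD (j+1) 0 ≤ b.getD k 0 := getD_mono hb (by omega) hk
        have hle' := le_of_lt habs
        simp only [Int.abs_eq_natAbs] at *
        omega
    · exact chain_desc b x j hchain k hle2

-- B's merged pass: result is ≥ best, covers every city, and is minimal with those properties
theorem altLoop_spec (b : List Int) (hb : b.Pairwise (· ≤ ·)) :
    ∀ (a : List Int) (j : Nat) (best : Int), a.Pairwise (· ≤ ·) → j < b.length →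
    (∀ k : Nat, k + 1 ≤ j → ∀ x ∈ a, |b.getD (k+1) 0 - x| ≤ |b.getD k 0 - x|) →
    best ≤ altLoop b a j best ∧
    (∀ x ∈ a, ∃ y ∈ b, |x - y| ≤ altLoop b a j best) ∧
    (∀ c : Int, best ≤ c → (∀ x ∈ a, ∃ y ∈ b, |x - y| ≤ c) → altLoop b a j best ≤ c) := by
  intro a
  induction a with
  | nil =>
    intro j best _ _ _
    refine ⟨le_refl _, by simp, fun c hc _ => ?_⟩
    simpa [altLoop] using hc
  | cons x rest ih =>
    intro j best hsa hj hchain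
    have hx_chain : ∀ k : Nat, k + 1 ≤ j → |b.getD (k+1) 0 - x| ≤ |b.getD k 0 - x| :=
      fun k hk => hchain k hk x (by simp)
    obtain ⟨hj1, hj2, hch', hmin⟩ := nearestFrom_spec b hb x j hj hx_chain
    have hx_le : ∀ x' ∈ rest, x ≤ x' := (List.pairwise_cons.mp hsa).1
    have hchain' : ∀ k : Nat, k + 1 ≤ nearestFrom b x j → ∀ x' ∈ rest,
        |b.getD (k+1) 0 - x'| ≤ |b.getD k 0 - x'| := by
      intro k hk x' hx'
      exact abs_persist (getD_mono hb (Nat.le_succ k) (by omega)) (hch' k hk) (hx_le x' hx')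
    obtain ⟨H1, H2, H3⟩ := ih (nearestFrom b x j)
      (max best |b.getD (nearestFrom b x j) 0 - x|) (List.pairwise_cons.mp hsa).2 hj2 hchain'
    have heq : altLoop b (x :: rest) j best
        = altLoop b rest (nearestFrom b x j) (max best |b.getD (nearestFrom b x j) 0 - x|) := by
      rw [altLoop]
    rw [heq]
    refine ⟨le_trans (le_max_left _ _) H1, ?_, ?_⟩
    · intro x'' hx''
      rcases List.mem_cons.mp hx'' with he | hmem
      · rw [he]
        refine ⟨b.getD (nearestFrom b x j) 0, ?_, ?_⟩
        · rw [List.getD_eq_getElem b 0 hj2]; exact List.getElem_mem _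
        · rw [abs_sub_comm]
          exact le_trans (le_trans (le_max_right _ _) H1) (le_refl _)
      · exact H2 x'' hmem
    · intro c hc hcov
      refine H3 c (max_le hc ?_) (fun x' hx' => hcov x' (List.mem_cons_of_mem _ hx'))
      obtain ⟨y, hy, hxy⟩ := hcov x (by simp)
      obtain ⟨k, hkl, hke⟩ := List.mem_iff_getElem.mp hy
      have hd := hmin k hkl
      rw [List.getD_eq_getElem b 0 hkl, hke, abs_sub_comm y x] at hd
      exact le_trans hd hxy

theorem covers_iff (c : Int) (a b : List Int) :
    (∀ j : Nat, j < a.length → ∃ k, k < b.length ∧ |a.getD j 0 - b.getD k 0| ≤ c) ↔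
    (∀ x ∈ a, ∃ y ∈ b, |x - y| ≤ c) := by
  constructor
  · intro h x hx
    obtain ⟨i, hi, rfl⟩ := List.mem_iff_getElem.mp hx
    obtain ⟨k, hk, hle⟩ := h i hi
    exact ⟨b[k], List.getElem_mem _, by
      rwa [List.getD_eq_getElem a 0 hi, List.getD_eq_getElem b 0 hk] at hle⟩
  · intro h j hj
    obtain ⟨y, hy, hle⟩ := h (a.getD j 0)
      (by rw [List.getD_eq_getElem a 0 hj]; exact List.getElem_mem _)
    obtain ⟨k, hk, hke⟩ := List.mem_iff_getElem.mp hy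
    exact ⟨k, hk, by rw [List.getD_eq_getElem b 0 hk, hke]; exact hle⟩

-- ===== VERDICT (by name: the statement is the Claim_ definition above) =====
theorem solve_spec : Claim_equal_solve := by
  unfold Claim_equal_solve
  intro n b a hdom hpre
  unfold Spec_solve solve solve_alt
  by_cases hnil : a = []
  · subst hnil
    have hsa : PySem.List.sorted ([] : List Int) (fun x => x) = [] :=
      (PySem.List.sorted_perm ([] : List Int) (fun x => x) false).eq_nil
    rw [hsa]
    obtain ⟨hr0, _, hrmin⟩ := bsLoop_least [] (PySem.List.sorted b (fun x => x))
      (fun c d _ _ => can_nil d _) 0 10000000005 (le_refl 0) (by norm_num)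
      (can_nil _ _) (Or.inr rfl)
    have := hrmin 0 (le_refl 0) (can_nil 0 _)
    have heq0 : altLoop (PySem.List.sorted b (fun x => x)) [] 0 0 = 0 := by rw [altLoop]
    rw [heq0]
    omega
  · have hbne : b ≠ [] := by
      rcases hpre with h' | h'
      · exact absurd h' hnil
      · exact h'
    have hsa_p : (PySem.List.sorted a (fun x => x)).Pairwise (· ≤ ·) :=
      PySem.List.sorted_pairwise a (fun x => x)
    have hsb_p : (PySem.List.sorted b (fun x => x)).Pairwise (· ≤ ·) :=
      PySem.List.sorted_pairwise b (fun x => x)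
    have hsb_len : 0 < (PySem.List.sorted b (fun x => x)).length := by
      rw [(PySem.List.sorted_perm b (fun x => x) false).length_eq]
      exact List.length_pos_iff.mpr hbne
    have hcan_iff : ∀ c : Int, can c (PySem.List.sorted a (fun x => x))
        (PySem.List.sorted b (fun x => x)) = true ↔
        ∀ x ∈ PySem.List.sorted a (fun x => x),
          ∃ y ∈ PySem.List.sorted b (fun x => x), |x - y| ≤ c := by
      intro c
      rw [can, canLoop_iff c _ _ hsa_p hsb_p 0 0 hsb_len
        (fun k hk => absurd hk (Nat.not_lt_zero k)), ← covers_iff]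
      constructor
      · intro h j hj; exact h j (Nat.zero_le j) hj
      · intro h j _ hj; exact h j hj
    have hmono : ∀ c d : Int, c ≤ d →
        can c (PySem.List.sorted a (fun x => x)) (PySem.List.sorted b (fun x => x)) = true →
        can d (PySem.List.sorted a (fun x => x)) (PySem.List.sorted b (fun x => x)) = true := by
      intro c d hcd hc
      rw [hcan_iff] at *
      intro x hx
      obtain ⟨y, hy, hle⟩ := hc x hx
      exact ⟨y, hy, le_trans hle hcd⟩
    have hHi : can 10000000005 (PySem.List.sorted a (fun x => x))
        (PySem.List.sorted b (fun x => x)) = true := by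
      rw [hcan_iff]
      intro x hx
      have hxa : x ∈ a := (PySem.List.mem_sorted a (fun x => x) false x).mp hx
      obtain ⟨y, hy⟩ : ∃ y, y ∈ b := by
        cases b with
        | nil => exact absurd rfl hbne
        | cons z zs => exact ⟨z, by simp⟩
      refine ⟨y, (PySem.List.mem_sorted b (fun x => x) false y).mpr hy, ?_⟩
      unfold Dom_solve at hdom
      simp only [pvDomInt, Bool.and_eq_true, List.all_eq_true, decide_eq_true_eq] at hdom
      have hx1 := hdom.2 x hxa
      have hy1 := hdom.1.2 y hy
      simp only [Int.abs_eq_natAbs]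
      omega
    obtain ⟨hA0, hAc, hAmin⟩ := bsLoop_least _ _ hmono 0 10000000005
      (le_refl 0) (by norm_num) hHi (Or.inr rfl)
    obtain ⟨hB1, hB2, hB3⟩ := altLoop_spec (PySem.List.sorted b (fun x => x)) hsb_p
      (PySem.List.sorted a (fun x => x)) 0 0 hsa_p hsb_len
      (fun k hk => absurd hk (by omega))
    have h1 := hAmin _ hB1 ((hcan_iff _).mpr hB2)
    have h2 := hB3 _ hA0 ((hcan_iff _).mp hAc)
    exact le_antisymm h1 h2
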